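-- pv_equiv track=rewrite | github.com/dayzerodx/counterr | counterr/util.py | has_hp
-- ===== SOURCE A (Python) =====
-- def has_hp(kmer):
--     """
--     Return True if the kmer has a homopolymer.
--     """
--     idx = 0
--     while idx < (len(kmer)-1):
--         if kmer[idx] == kmer[idx+1]:
--             n_repeat = 1
--             while (idx < (len(kmer)-1)) and (kmer[idx] == kmer[idx+1]):
--                 n_repeat += 1
--                 idx += 1
--             if n_repeat >= 3:
--                 return True
--         else:
--             idx += 1
--     return False
-- ===== SOURCE B (Python) =====
-- def has_hp(kmer):
--     """
--     Return True if the kmer has a homopolymer.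
--     """
--     return any(kmer[i] == kmer[i + 1] == kmer[i + 2] for i in range(len(kmer) - 2))
-- ===== Notes on version B (the rewrite author's own statement) =====
-- stated objective: simpler
-- what changed: Replaced the nested while loops with a run-length accumulator by a single any() over all windows of three consecutive characters (a run of length >=3 exists iff some triple of consecutive characters are all equal).
import Mathlib
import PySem

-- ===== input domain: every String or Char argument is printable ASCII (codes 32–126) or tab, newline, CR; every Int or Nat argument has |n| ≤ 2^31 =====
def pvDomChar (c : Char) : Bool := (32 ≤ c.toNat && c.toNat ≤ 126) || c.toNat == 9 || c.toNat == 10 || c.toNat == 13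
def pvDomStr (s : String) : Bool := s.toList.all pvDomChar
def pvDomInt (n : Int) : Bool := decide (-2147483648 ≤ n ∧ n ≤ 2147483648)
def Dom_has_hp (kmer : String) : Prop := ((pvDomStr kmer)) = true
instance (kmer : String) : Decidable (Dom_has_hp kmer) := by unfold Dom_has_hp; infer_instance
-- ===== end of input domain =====

-- B replaces A's nested while loops and run-length counter by one scan of all
-- 3-character windows (objective: simpler; same O(n) cost).

-- ===== PORT A =====
-- inner while loop of A: `while (idx < (len(kmer)-1)) and (kmer[idx] == kmer[idx+1]): n_repeat += 1; idx += 1`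
-- (fuel is only a totality guard; cs.length fuel always suffices since idx strictly increases)
def hpInner (cs : List Char) (fuel nrep idx : Nat) : Nat × Nat :=
  match fuel with
  | 0 => (nrep, idx)
  | f + 1 =>
    if idx < cs.length - 1 ∧ cs.getD idx 'A' = cs.getD (idx + 1) 'A' then
      hpInner cs f (nrep + 1) (idx + 1)
    else
      (nrep, idx)

-- outer while loop of A (fuel, again only a totality guard: idx strictly increases)
def hpOuter (cs : List Char) (fuel idx : Nat) : Bool :=
  match fuel with
  | 0 => false
  | f + 1 =>
    if idx < cs.length - 1 then
      if cs.getD idx 'A' = cs.getD (idx + 1) 'A' then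
        let p := hpInner cs cs.length 1 idx
        if 3 ≤ p.1 then true
        else hpOuter cs f p.2
      else hpOuter cs f (idx + 1)
    else false

def has_hp (kmer : String) : Bool := hpOuter kmer.toList kmer.toList.length 0

-- ===== PORT B =====
def has_hp_alt (kmer : String) : Bool :=
  let cs := kmer.toList
  (List.range (cs.length - 2)).any fun i =>
    cs.getD i 'A' == cs.getD (i + 1) 'A' && cs.getD (i + 1) 'A' == cs.getD (i + 2) 'A'

-- ===== PRECONDITION & SPEC =====
def Spec_has_hp (kmer : String) (out : Bool) : Prop := out = has_hp_alt kmer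
instance (kmer : String) (out : Bool) : Decidable (Spec_has_hp kmer out) := by unfold Spec_has_hp; infer_instance

-- ===== CLAIM (what is proved, stated in full; the proofs are below) =====
def Claim_equal_has_hp : Prop := ∀ (kmer : String), Dom_has_hp kmer → Spec_has_hp kmer (has_hp kmer)

-- ===== LEMMAS AND PROOFS =====

-- a triple of equal consecutive characters at position j
def hpTrip (cs : List Char) (j : Nat) : Prop :=
  j + 2 < cs.length ∧ cs.getD j 'A' = cs.getD (j + 1) 'A' ∧ cs.getD (j + 1) 'A' = cs.getD (j + 2) 'A'

theorem hpInner_step (cs : List Char) (f nrep idx : Nat)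
    (h : idx < cs.length - 1 ∧ cs.getD idx 'A' = cs.getD (idx + 1) 'A') :
    hpInner cs (f + 1) nrep idx = hpInner cs f (nrep + 1) (idx + 1) := by
  rw [hpInner]; exact if_pos h

theorem hpInner_stop (cs : List Char) (f nrep idx : Nat)
    (h : ¬ (idx < cs.length - 1 ∧ cs.getD idx 'A' = cs.getD (idx + 1) 'A')) :
    hpInner cs f nrep idx = (nrep, idx) := by
  cases f with
  | zero => rw [hpInner]
  | succ f => rw [hpInner]; exact if_neg h

theorem hpInner_fst_ge (cs : List Char) (f : Nat) :
    ∀ nrep idx, nrep ≤ (hpInner cs f nrep idx).1 := by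
  induction f with
  | zero => intro nrep idx; rw [hpInner]
  | succ f ih =>
    intro nrep idx
    rw [hpInner]
    by_cases h : idx < cs.length - 1 ∧ cs.getD idx 'A' = cs.getD (idx + 1) 'A'
    · rw [if_pos h]; have := ih (nrep + 1) (idx + 1); omega
    · rw [if_neg h]

-- if the run stops right after idx+1, the inner loop returns n_repeat = 2 at idx+1
theorem hpInner_small (cs : List Char) (f idx : Nat)
    (h : idx < cs.length - 1 ∧ cs.getD idx 'A' = cs.getD (idx + 1) 'A')
    (hc : ¬ (idx + 1 < cs.length - 1 ∧ cs.getD (idx + 1) 'A' = cs.getD (idx + 2) 'A')) :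
    hpInner cs (f + 1) 1 idx = (2, idx + 1) := by
  rw [hpInner_step cs f 1 idx h, hpInner_stop cs f 2 (idx + 1) hc]

-- if the run continues at idx+1 too, the inner loop counts at least 3
theorem hpInner_big (cs : List Char) (f idx : Nat)
    (h : idx < cs.length - 1 ∧ cs.getD idx 'A' = cs.getD (idx + 1) 'A')
    (hc : idx + 1 < cs.length - 1 ∧ cs.getD (idx + 1) 'A' = cs.getD (idx + 2) 'A') :
    3 ≤ (hpInner cs (f + 2) 1 idx).1 := by
  rw [hpInner_step cs (f + 1) 1 idx h, hpInner_step cs f 2 (idx + 1) hc]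
  exact hpInner_fst_ge cs f 3 (idx + 2)

-- characterisation of A's outer loop: with enough fuel it returns true iff a triple exists at or after idx
theorem hpOuter_iff (cs : List Char) (f : Nat) :
    ∀ idx, cs.length - 1 ≤ f + idx →
      (hpOuter cs f idx = true ↔ ∃ j, idx ≤ j ∧ hpTrip cs j) := by
  induction f with
  | zero =>
    intro idx hf
    rw [hpOuter]
    simp only [Bool.false_eq_true, false_iff]
    rintro ⟨j, hj, ht⟩
    have := ht.1
    omega
  | succ f ih =>
    intro idx hf
    rw [hpOuter]
    by_cases h : idx < cs.length - 1
    · rw [if_pos h]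
      by_cases h2 : cs.getD idx 'A' = cs.getD (idx + 1) 'A'
      · rw [if_pos h2]
        by_cases hc : idx + 1 < cs.length - 1 ∧ cs.getD (idx + 1) 'A' = cs.getD (idx + 2) 'A'
        · -- the run reaches length ≥ 3: A returns true, and the triple sits at idx
          have hlen : cs.length = (cs.length - 2) + 2 := by omega
          have h3 : 3 ≤ (hpInner cs cs.length 1 idx).1 := by
            rw [hlen]; exact hpInner_big cs (cs.length - 2) idx ⟨h, h2⟩ hc
          rw [if_pos h3]
          simp only [true_iff]
          exact ⟨idx, le_refl idx, by omega, h2, hc.2⟩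
        · -- run of length exactly 2: inner returns (2, idx+1), A moves on from idx+1
          have hlen : cs.length = (cs.length - 1) + 1 := by omega
          have hsm : hpInner cs cs.length 1 idx = (2, idx + 1) := by
            rw [hlen]; exact hpInner_small cs (cs.length - 1) idx ⟨h, h2⟩ hc
          have h3 : ¬ 3 ≤ (hpInner cs cs.length 1 idx).1 := by rw [hsm]; omega
          rw [if_neg h3, hsm]
          rw [ih (idx + 1) (by omega)]
          constructor
          · rintro ⟨j, hj, ht⟩; exact ⟨j, by omega, ht⟩
          · rintro ⟨j, hj, ht⟩
            refine ⟨j, ?_, ht⟩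
            rcases Nat.eq_or_lt_of_le hj with rfl | hlt
            · obtain ⟨ht1, ht2, ht3⟩ := ht
              exact absurd ⟨by omega, ht3⟩ hc
            · omega
      · -- characters differ: no triple can start at idx
        rw [if_neg h2]
        rw [ih (idx + 1) (by omega)]
        constructor
        · rintro ⟨j, hj, ht⟩; exact ⟨j, by omega, ht⟩
        · rintro ⟨j, hj, ht⟩
          refine ⟨j, ?_, ht⟩
          rcases Nat.eq_or_lt_of_le hj with rfl | hlt
          · exact absurd ht.2.1 h2
          · omega
    · rw [if_neg h]
      simp only [Bool.false_eq_true, false_iff]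
      rintro ⟨j, hj, ht⟩
      have := ht.1
      omega

theorem has_hp_alt_iff (kmer : String) :
    has_hp_alt kmer = true ↔ ∃ j, 0 ≤ j ∧ hpTrip kmer.toList j := by
  unfold has_hp_alt hpTrip
  simp only [List.any_eq_true, List.mem_range, Bool.and_eq_true, beq_iff_eq]
  constructor
  · rintro ⟨i, hi, h1, h2⟩; exact ⟨i, Nat.zero_le _, by omega, h1, h2⟩
  · rintro ⟨j, _, hj, h1, h2⟩; exact ⟨j, by omega, h1, h2⟩

-- ===== VERDICT (by name: the statement is the Claim_ definition above) =====
theorem has_hp_spec : Claim_equal_has_hp := by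
  intro kmer _
  unfold Spec_has_hp has_hp
  rw [Bool.eq_iff_iff, hpOuter_iff kmer.toList kmer.toList.length 0 (by omega), has_hp_alt_iff]
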